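-- pv_equiv track=rewrite | github.com/mshahoyi/predict-train | mo/04_misalignment_probe.py | get_line_spans
-- ===== SOURCE A (Python) =====
-- def get_line_spans(tokens: list[str]) -> list[tuple[int, int, str]]:
--     """
--     Split tokens into line-based spans.
--
--     Returns:
--         List of (start_idx, end_idx, line_text) tuples
--     """
--     spans = []
--     current_line_start = 0
--     current_line_tokens = []
--
--     for i, token in enumerate(tokens):
--         current_line_tokens.append(token)
--         # Check if this token contains a newline
--         if '\n' in token:
--             line_text = ''.join(current_line_tokens).strip()
--             if line_text:  # Only add non-empty lines
--                 spans.append((current_line_start, i + 1, line_text))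
--             current_line_start = i + 1
--             current_line_tokens = []
--
--     # Add remaining tokens as last line
--     if current_line_tokens:
--         line_text = ''.join(current_line_tokens).strip()
--         if line_text:
--             spans.append((current_line_start, len(tokens), line_text))
--
--     # If no spans found (no newlines), treat entire text as one span
--     if not spans:
--         spans.append((0, len(tokens), ''.join(tokens).strip()))
--
--     return spans
-- ===== SOURCE B (Python) =====
-- def get_line_spans(tokens: list[str]) -> list[tuple[int, int, str]]:
--     n = len(tokens)
--     cuts = [i for i, t in enumerate(tokens) if '\n' in t]
--     spans = []
--     start = 0
--     for p in cuts:
--         text = ''.join(tokens[start:p + 1]).strip()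
--         if text:
--             spans.append((start, p + 1, text))
--         start = p + 1
--     if start < n:
--         text = ''.join(tokens[start:]).strip()
--         if text:
--             spans.append((start, n, text))
--     if not spans:
--         spans = [(0, n, ''.join(tokens).strip())]
--     return spans
-- ===== Notes on version B (the rewrite author's own statement) =====
-- stated objective: alternative
-- what changed: B first collects the cut indices (tokens containing a newline) in one scan, then builds spans by slicing the token list between consecutive cuts, instead of A's single loop that accumulates a growing buffer list and flushes it at each newline.
import Mathlib
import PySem

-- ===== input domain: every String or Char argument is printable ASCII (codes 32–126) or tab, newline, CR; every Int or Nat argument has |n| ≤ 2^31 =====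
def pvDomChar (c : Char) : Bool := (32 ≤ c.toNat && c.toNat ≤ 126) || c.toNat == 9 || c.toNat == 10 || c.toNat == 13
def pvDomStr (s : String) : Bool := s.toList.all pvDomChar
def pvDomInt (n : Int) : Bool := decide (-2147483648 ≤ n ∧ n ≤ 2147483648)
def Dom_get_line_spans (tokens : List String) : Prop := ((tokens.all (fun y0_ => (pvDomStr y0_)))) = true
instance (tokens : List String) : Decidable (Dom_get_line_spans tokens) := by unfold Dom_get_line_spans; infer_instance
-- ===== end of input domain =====

-- B replaces A's buffer-accumulating loop by a cut-index scan plus slicing; same cost, different decomposition.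

-- ===== PORT A =====
-- ''.join(ts).strip()
def pvJoinStrip (ts : List String) : String := PySem.Str.strip (PySem.Str.join "" ts)

-- the 'for i, token in enumerate(tokens)' loop of A, state = (current_line_start, current_line_tokens, spans)
def pvLoopA (rest : List String) (i : Nat) (start : Nat) (buf : List String)
    (spans : List (Int × Int × String)) : Nat × List String × List (Int × Int × String) :=
  match rest with
  | [] => (start, buf, spans)
  | t :: rest =>
    let buf := buf ++ [t]
    if PySem.Str.isIn "\n" t then
      let lineText := pvJoinStrip buf
      let spans := if lineText ≠ "" then spans ++ [((start : Int), ((i + 1 : Nat) : Int), lineText)] else spans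
      pvLoopA rest (i + 1) (i + 1) [] spans
    else
      pvLoopA rest (i + 1) start buf spans

def get_line_spans (tokens : List String) : List (Int × Int × String) :=
  match pvLoopA tokens 0 0 [] [] with
  | (start, buf, spans) =>
    let spans :=
      if buf ≠ [] then
        let lineText := pvJoinStrip buf
        if lineText ≠ "" then spans ++ [((start : Int), (tokens.length : Int), lineText)] else spans
      else spans
    if spans = [] then [(0, (tokens.length : Int), pvJoinStrip tokens)] else spans

-- ===== PORT B =====
-- 'for p in cuts' loop of B, state = (start, spans); segments are slices of the full token list
def pvLoopB (tokens : List String) (cuts : List Int) (start : Int)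
    (spans : List (Int × Int × String)) : Int × List (Int × Int × String) :=
  match cuts with
  | [] => (start, spans)
  | p :: ps =>
    let text := PySem.Str.strip (PySem.Str.join "" (PySem.List.slice tokens (some start) (some (p + 1))))
    let spans := if text ≠ "" then spans ++ [(start, p + 1, text)] else spans
    pvLoopB tokens ps (p + 1) spans

def get_line_spans_alt (tokens : List String) : List (Int × Int × String) :=
  let n : Int := tokens.length
  let cuts : List Int :=
    ((PySem.List.enumerate tokens 0).filter (fun p => PySem.Str.isIn "\n" p.2)).map Prod.fst
  match pvLoopB tokens cuts 0 [] with
  | (start, spans) =>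
    let spans :=
      if start < n then
        let text := PySem.Str.strip (PySem.Str.join "" (PySem.List.slice tokens (some start) none))
        if text ≠ "" then spans ++ [(start, n, text)] else spans
      else spans
    if spans = [] then [(0, n, PySem.Str.strip (PySem.Str.join "" tokens))] else spans

-- ===== PRECONDITION & SPEC =====
def Spec_get_line_spans (tokens : List String) (out : List (Int × Int × String)) : Prop := out = get_line_spans_alt tokens
instance (tokens : List String) (out : List (Int × Int × String)) : Decidable (Spec_get_line_spans tokens out) := by unfold Spec_get_line_spans; infer_instance

-- ===== CLAIM (what is proved, stated in full; the proofs are below) =====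
def Claim_equal_get_line_spans : Prop := ∀ (tokens : List String), Dom_get_line_spans tokens → Spec_get_line_spans tokens (get_line_spans tokens)

-- ===== LEMMAS AND PROOFS =====

-- A's loop state vs B's cut walk: after processing 'rest' (tokens = pre ++ rest, next index = pre.length,
-- buffer = pre.drop start), both loops agree on the final start and spans, and A's final buffer is tokens.drop start'.
theorem pvLoop_agree (rest : List String) : ∀ (pre tokens : List String) (start : Nat)
    (spans : List (Int × Int × String)), start ≤ pre.length → tokens = pre ++ rest →
    ∃ s' : Nat, ∃ spans' : List (Int × Int × String),
      pvLoopB tokens (((PySem.List.enumerate rest (pre.length : Int)).filter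
          (fun p => PySem.Str.isIn "\n" p.2)).map Prod.fst) (start : Int) spans = ((s' : Int), spans') ∧
      pvLoopA rest pre.length start (pre.drop start) spans = (s', tokens.drop s', spans') ∧
      s' ≤ tokens.length := by
  induction rest with
  | nil =>
    intro pre tokens start spans hs htok
    refine ⟨start, spans, ?_, ?_, ?_⟩
    · simp [PySem.List.enumerate_nil, pvLoopB]
    · simp [pvLoopA, htok]
    · simp [htok]; omega
  | cons t rest ih =>
    intro pre tokens start spans hs htok
    have hdrop : tokens.drop start = pre.drop start ++ t :: rest := by
      rw [htok, List.drop_append_of_le_length hs]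
    have hlen : (pre ++ [t]).length = pre.length + 1 := by simp
    by_cases hnl : PySem.Str.isIn "\n" t
    · -- token contains a newline: a cut here
      have hslice : PySem.List.slice tokens (some (start : Int)) (some ((pre.length : Int) + 1))
          = pre.drop start ++ [t] := by
        have h1 : ((pre.length : Int) + 1) = ((pre.length + 1 : Nat) : Int) := by push_cast; ring
        rw [h1, PySem.List.slice_natCast]
        have h2 : pre.length + 1 - start = (pre.drop start).length + 1 := by
          simp [List.length_drop]; omega
        rw [hdrop, h2, List.take_append]
        simp
      have htext : PySem.Str.strip (PySem.Str.join "" (PySem.List.slice tokens (some (start : Int))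
          (some ((pre.length : Int) + 1)))) = pvJoinStrip (pre.drop start ++ [t]) := by
        rw [hslice]; rfl
      obtain ⟨s', spans', hB, hA, hle⟩ := ih (pre ++ [t]) tokens (pre.length + 1)
        (if pvJoinStrip (pre.drop start ++ [t]) ≠ "" then
            spans ++ [((start : Int), ((pre.length + 1 : Nat) : Int), pvJoinStrip (pre.drop start ++ [t]))]
          else spans)
        (by simp) (by rw [htok]; simp)
      refine ⟨s', spans', ?_, ?_, hle⟩
      · rw [PySem.List.enumerate_cons]
        push_cast [List.length_append] at hB
        rw [List.filter_cons_of_pos (by simpa using hnl)]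
        simp only [List.map_cons]
        simp only [pvLoopB, htext]
        exact hB
      · have hb : (pre ++ [t]).drop (pre.length + 1) = [] := by simp
        rw [hlen, hb] at hA
        rw [pvLoopA]
        simp only [hnl]
        exact hA
    · -- no newline: keep accumulating
      obtain ⟨s', spans', hB, hA, hle⟩ := ih (pre ++ [t]) tokens start spans
        (by simp; omega) (by rw [htok]; simp)
      refine ⟨s', spans', ?_, ?_, hle⟩
      · rw [PySem.List.enumerate_cons]
        push_cast [List.length_append] at hB
        rw [List.filter_cons_of_neg (by simpa using hnl)]
        exact hB
      · have hbuf : (pre ++ [t]).drop start = pre.drop start ++ [t] :=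
          List.drop_append_of_le_length hs
        rw [hlen, hbuf] at hA
        rw [pvLoopA]
        simp only [hnl]
        exact hA

theorem get_line_spans_spec : Claim_equal_get_line_spans := by
  intro tokens _
  unfold Spec_get_line_spans get_line_spans get_line_spans_alt
  obtain ⟨s', spans', hB, hA, hle⟩ := pvLoop_agree tokens [] tokens 0 [] (by simp) (by simp)
  simp only [List.length_nil, Nat.cast_zero, List.drop_zero] at hB hA
  simp only [hA, hB]
  have hfrom : PySem.List.slice tokens (some (s' : Int)) none = tokens.drop s' :=
    PySem.List.slice_from_natCast ..
  by_cases hlt : s' < tokens.length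
  · have h1 : ((s' : Int) < (tokens.length : Int)) := by exact_mod_cast hlt
    have h2 : tokens.drop s' ≠ [] := by
      rw [Ne, List.drop_eq_nil_iff]; omega
    simp only [if_pos h1, if_pos h2, hfrom, pvJoinStrip]
  · have h1 : ¬ ((s' : Int) < (tokens.length : Int)) := by
      push Not
      exact_mod_cast Nat.le_of_not_lt hlt
    have h2 : tokens.drop s' = [] := by rw [List.drop_eq_nil_iff]; omega
    simp only [if_neg h1, h2, pvJoinStrip]
    simp
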